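-- pv_equiv track=rewrite | github.com/POPzxh/COMP9021_19T1 | quiz_5_Martin_Version.py | code_derived_set
-- ===== SOURCE A (Python) =====
-- def code_derived_set(encoded_set):
--     running_sums = []
--     running_sum = 0
--     encoded_set = bin(encoded_set)[2 :][: : -1]
--     for i in range(len(encoded_set) // 2 * 2 - 1, -1, -2):
--         if encoded_set[i] == '1':
--             running_sum += -(i + 1) // 2
--             running_sums.append(running_sum)
--     for i in range(0, len(encoded_set), 2):
--         if encoded_set[i] == '1':
--             running_sum += i // 2
--             running_sums.append(running_sum)
--     encoded_running_sum = 0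
--     for value in running_sums:
--         if value < 0:
--             encoded_running_sum |= 1 << (-value * 2 - 1)
--         else:
--             encoded_running_sum |= 1 << (value * 2)
--     return encoded_running_sum
-- ===== SOURCE B (Python) =====
-- def code_derived_set(encoded_set):
--     # Collect decoded values from the bits of |encoded_set| in one pass
--     # (A's bin()-string decode ignores the '-'/'b' characters, so abs matches it),
--     # then sort, take prefix sums, and re-encode.
--     m = abs(encoded_set)
--     values = []
--     i = 0
--     while m:
--         if m & 1:
--             values.append(i // 2 if i % 2 == 0 else -((i + 1) // 2))
--         m >>= 1
--         i += 1
--     values.sort()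
--     out = 0
--     s = 0
--     for v in values:
--         s += v
--         out |= 1 << (s * 2) if s >= 0 else 1 << (-s * 2 - 1)
--     return out
-- ===== Notes on version B (the rewrite author's own statement) =====
-- stated objective: alternative
-- what changed: A makes two directional index sweeps over the reversed bin() string (odd indices descending, then even indices ascending) while accumulating running sums; B instead collects all set-bit values of abs(n) in one low-to-high bit pass, sorts them, takes prefix sums, and re-encodes.
import Mathlib
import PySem

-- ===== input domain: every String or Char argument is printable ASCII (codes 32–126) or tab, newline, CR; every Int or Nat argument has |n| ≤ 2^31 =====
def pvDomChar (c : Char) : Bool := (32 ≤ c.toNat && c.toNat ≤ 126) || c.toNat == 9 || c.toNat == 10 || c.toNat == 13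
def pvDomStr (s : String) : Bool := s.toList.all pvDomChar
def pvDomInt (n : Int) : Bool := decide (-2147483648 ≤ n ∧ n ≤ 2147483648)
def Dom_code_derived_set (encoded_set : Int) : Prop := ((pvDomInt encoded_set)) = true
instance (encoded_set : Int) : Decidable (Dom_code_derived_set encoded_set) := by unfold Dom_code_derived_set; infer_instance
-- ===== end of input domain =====

-- B replaces A's two directional index sweeps over the bin() string by collect-bits / sort / prefix-sum / re-encode (alternative decomposition, same cost class).

-- ===== PORT A =====
def code_derived_set (encoded_set : Int) : Int :=
  -- encoded_set = bin(encoded_set)[2:][::-1]  ([::-1] is reverse: PySem.List.slice?_none_none_neg_one)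
  let es : List Char := (PySem.List.slice (PySem.Int.toBinChars0b encoded_set) (some 2) none).reverse
  -- first loop: i over range(len//2*2-1, -1, -2); state (running_sums, running_sum)
  let st1 := (PySem.List.pyRange (PySem.Int.floordiv (es.length : Int) 2 * 2 - 1) (-1) (-2)).foldl
    (fun (st : List Int × Int) i =>
      if PySem.List.pyGetD es i ' ' = '1' then   -- es[i] == '1' (index provably in range)
        (st.1 ++ [st.2 + PySem.Int.floordiv (-(i + 1)) 2], st.2 + PySem.Int.floordiv (-(i + 1)) 2)
      else st) ([], 0)
  -- second loop: i over range(0, len, 2)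
  let st2 := (PySem.List.pyRange 0 (es.length : Int) 2).foldl
    (fun (st : List Int × Int) i =>
      if PySem.List.pyGetD es i ' ' = '1' then
        (st.1 ++ [st.2 + PySem.Int.floordiv i 2], st.2 + PySem.Int.floordiv i 2)
      else st) st1
  -- third loop: encode the running sums
  st2.1.foldl
    (fun (acc : Int) (value : Int) =>
      if value < 0 then PySem.Int.bor acc ((1 : Int) <<< (-value * 2 - 1).toNat)
      else PySem.Int.bor acc ((1 : Int) <<< (value * 2).toNat)) 0

-- ===== PORT B =====
-- the 'while m: … m >>= 1' bit-collecting loop of Source B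
def cdsCollect (m : Nat) (i : Nat) : List Int :=
  if h : m = 0 then []
  else
    (if m % 2 = 1 then
        [if i % 2 = 0 then ((i / 2 : Nat) : Int) else -(((i + 1) / 2 : Nat) : Int)]
      else []) ++ cdsCollect (m / 2) (i + 1)
decreasing_by exact Nat.div_lt_self (Nat.pos_of_ne_zero h) one_lt_two

def code_derived_set_alt (encoded_set : Int) : Int :=
  let values := PySem.List.sorted (cdsCollect encoded_set.natAbs 0) (fun x => x) false
  (values.foldl
    (fun (st : Int × Int) v =>
      let s := st.2 + v
      (PySem.Int.bor st.1 (if s ≥ 0 then (1 : Int) <<< (s * 2).toNat else (1 : Int) <<< (-s * 2 - 1).toNat), s))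
    (0, 0)).1

-- ===== PRECONDITION & SPEC =====
def Spec_code_derived_set (encoded_set : Int) (out : Int) : Prop := out = code_derived_set_alt encoded_set
instance (encoded_set : Int) (out : Int) : Decidable (Spec_code_derived_set encoded_set out) := by unfold Spec_code_derived_set; infer_instance

-- ===== CLAIM (what is proved, stated in full; the proofs are below) =====
def Claim_equal_code_derived_set : Prop := ∀ (encoded_set : Int), Dom_code_derived_set encoded_set → Spec_code_derived_set encoded_set (code_derived_set encoded_set)

-- ===== LEMMAS AND PROOFS =====

-- LSB-first binary digits of m (empty for 0), and Python's bin-digit list bin(m)[2:] reversed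
def bitsCore (m : Nat) : List Char :=
  if h : m = 0 then [] else (if m % 2 = 1 then '1' else '0') :: bitsCore (m / 2)
decreasing_by exact Nat.div_lt_self (Nat.pos_of_ne_zero h) one_lt_two

def bitsLSB (m : Nat) : List Char := if m = 0 then ['0'] else bitsCore m

def pvP (L : List Char) (k : Nat) : Bool := L.getD k ' ' == '1'

def pvVal (k : Nat) : Int :=
  if k % 2 = 0 then ((k / 2 : Nat) : Int) else -(((k + 1) / 2 : Nat) : Int)

def pvNegPart (L : List Char) : List Int :=
  (((List.range (L.length / 2)).filter (fun j => pvP L (2 * j + 1))).map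
    (fun j : Nat => -((j : Int) + 1))).reverse

def pvPosPart (L : List Char) : List Int :=
  ((List.range ((L.length + 1) / 2)).filter (fun j => pvP L (2 * j))).map (fun j : Nat => (j : Int))

def preSums (s : Int) : List Int → List Int
  | [] => []
  | v :: t => (s + v) :: preSums (s + v) t

def encB (u : Int) : Int :=
  if u ≥ 0 then (1 : Int) <<< (u * 2).toNat else (1 : Int) <<< (-u * 2 - 1).toNat

def encodeF (l : List Int) : Int := l.foldl (fun a u => PySem.Int.bor a (encB u)) 0

def valsFrom : List Char → Nat → List Int
  | [], _ => []
  | c :: t, i => (if c = '1' then [pvVal i] else []) ++ valsFrom t (i + 1)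

-- toDigits characterization
lemma toDigitsCore_eq_bits (fuel : Nat) : ∀ (m : Nat) (ds : List Char), m < fuel →
    Nat.toDigitsCore 2 fuel m ds = (bitsLSB m).reverse ++ ds := by
  induction fuel with
  | zero => intro m ds h; omega
  | succ f ih =>
    intro m ds _
    simp only [Nat.toDigitsCore]
    by_cases h0 : m / 2 = 0
    · have hm : m = 0 ∨ m = 1 := by omega
      rcases hm with rfl | rfl <;> simp [h0, bitsLSB, bitsCore] <;> rfl
    · have hm2 : 2 ≤ m := by omega
      rw [if_neg h0, ih (m / 2) _ (by omega)]
      have h1 : bitsLSB (m / 2) = bitsCore (m / 2) := by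
        unfold bitsLSB; rw [if_neg h0]
      have h2 : bitsLSB m = (if m % 2 = 1 then '1' else '0') :: bitsCore (m / 2) := by
        unfold bitsLSB
        rw [if_neg (by omega : ¬ m = 0), bitsCore, dif_neg (by omega : ¬ m = 0)]
      rw [h1, h2]
      have hd : Nat.digitChar (m % 2) = (if m % 2 = 1 then '1' else '0') := by
        rcases Nat.mod_two_eq_zero_or_one m with h | h <;> rw [h] <;> rfl
      simp [hd]

lemma toDigits_eq_bits (m : Nat) : Nat.toDigits 2 m = (bitsLSB m).reverse := by
  have := toDigitsCore_eq_bits (m + 1) m [] (by omega)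
  simpa [Nat.toDigits] using this

-- generic fold shapes
lemma foldPair (l : List Int) : ∀ (acc : List Int) (s : Int),
    l.foldl (fun (st : List Int × Int) v => (st.1 ++ [st.2 + v], st.2 + v)) (acc, s)
      = (acc ++ preSums s l, s + l.sum) := by
  induction l with
  | nil => intro acc s; simp [preSums]
  | cons v t ih =>
    intro acc s
    simp only [List.foldl_cons, preSums, List.sum_cons]
    rw [ih]
    simp [add_assoc]

lemma preSums_append (s : Int) (l1 l2 : List Int) :
    preSums s (l1 ++ l2) = preSums s l1 ++ preSums (s + l1.sum) l2 := by
  induction l1 generalizing s with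
  | nil => simp [preSums]
  | cons v t ih => simp [preSums, ih, add_assoc]

-- range helpers for A's step-(-2) and step-2 loops (no PySem lemma covers |step| = 2)
lemma map_range_congr (f : Nat → Int) (c1 c2 : Nat) (h : c1 = c2) :
    List.map f (List.range c1) = List.map f (List.range c2) := by rw [h]

lemma pyRange_neg_two (a : Int) : PySem.List.pyRange a (-1) (-2)
    = (List.range ((a + 2) / 2).toNat).map (fun k : Nat => a + -2 * (k : Int)) := by
  unfold PySem.List.pyRange
  rw [if_neg (by norm_num : ¬ (-2 : Int) = 0)]
  apply map_range_congr
  norm_num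
  split <;> omega

lemma pyRange_two (b : Int) : PySem.List.pyRange 0 b 2
    = (List.range ((b + 1) / 2).toNat).map (fun k : Nat => 0 + 2 * (k : Int)) := by
  unfold PySem.List.pyRange
  rw [if_neg (by norm_num : ¬ (2 : Int) = 0)]
  apply map_range_congr
  norm_num
  split <;> omega

lemma range_rev (q : Nat) : (List.range q).reverse = (List.range q).map (fun k => q - 1 - k) := by
  apply List.ext_getElem
  · simp
  · intro i h1 h2
    simp only [List.getElem_reverse, List.getElem_range, List.getElem_map, List.length_range]

lemma decide_eq_pvP (L : List Char) (k : Nat) :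
    decide (L.getD k ' ' = '1') = pvP L k := by
  unfold pvP
  by_cases h : L.getD k ' ' = '1'
  · rw [h]
    rfl
  · rw [decide_eq_false h]
    exact (beq_eq_false_iff_ne.mpr h).symm

-- A's loops
lemma fold1_eq (L : List Char) :
    (PySem.List.pyRange (PySem.Int.floordiv (L.length : Int) 2 * 2 - 1) (-1) (-2)).foldl
      (fun (st : List Int × Int) i =>
        if PySem.List.pyGetD L i ' ' = '1' then
          (st.1 ++ [st.2 + PySem.Int.floordiv (-(i + 1)) 2], st.2 + PySem.Int.floordiv (-(i + 1)) 2)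
        else st) ([], 0)
      = (preSums 0 (pvNegPart L), (pvNegPart L).sum) := by
  have hflo : PySem.Int.floordiv (L.length : Int) 2 = ((L.length / 2 : Nat) : Int) := by
    exact_mod_cast PySem.Int.floordiv_natCast L.length 2
  rw [hflo, pyRange_neg_two]
  have hcnt : ((((L.length / 2 : Nat) : Int) * 2 - 1 + 2) / 2).toNat = L.length / 2 := by omega
  rw [hcnt, List.foldl_map]
  have hcg := PySem.List.foldl_congr_mem (List.range (L.length / 2))
    (fun (st : List Int × Int) (k : Nat) =>
      if PySem.List.pyGetD L (((L.length / 2 : Nat) : Int) * 2 - 1 + -2 * (k : Int)) ' ' = '1' then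
        (st.1 ++ [st.2 + PySem.Int.floordiv (-(((L.length / 2 : Nat) : Int) * 2 - 1 + -2 * (k : Int) + 1)) 2],
          st.2 + PySem.Int.floordiv (-(((L.length / 2 : Nat) : Int) * 2 - 1 + -2 * (k : Int) + 1)) 2)
      else st)
    (fun (st : List Int × Int) (k : Nat) =>
      if L.getD (2 * (L.length / 2 - 1 - k) + 1) ' ' = '1' then
        (st.1 ++ [st.2 + -(((L.length / 2 - 1 - k : Nat) : Int) + 1)],
          st.2 + -(((L.length / 2 - 1 - k : Nat) : Int) + 1))
      else st)
    ([], 0)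
    (by
      intro st k hk
      dsimp only
      rw [List.mem_range] at hk
      have hidx : ((L.length / 2 : Nat) : Int) * 2 - 1 + -2 * (k : Int)
          = ((2 * (L.length / 2 - 1 - k) + 1 : Nat) : Int) := by omega
      rw [hidx, PySem.List.pyGetD_natCast]
      have hval : PySem.Int.floordiv (-(((2 * (L.length / 2 - 1 - k) + 1 : Nat) : Int) + 1)) 2
          = -(((L.length / 2 - 1 - k : Nat) : Int) + 1) := by
        rw [PySem.Int.floordiv_eq_ediv_of_pos (by norm_num)]
        omega
      rw [hval])
  rw [hcg]
  rw [← List.foldl_map (f := fun k : Nat => L.length / 2 - 1 - k)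
    (g := fun (st : List Int × Int) (j : Nat) =>
      if L.getD (2 * j + 1) ' ' = '1' then
        (st.1 ++ [st.2 + -((j : Int) + 1)], st.2 + -((j : Int) + 1))
      else st), ← range_rev]
  rw [PySem.List.foldl_ite_eq_foldl_filter (p := fun j : Nat => L.getD (2 * j + 1) ' ' = '1')
    (f := fun (st : List Int × Int) (j : Nat) =>
      (st.1 ++ [st.2 + -((j : Int) + 1)], st.2 + -((j : Int) + 1)))]
  rw [List.filter_reverse]
  rw [← List.foldl_map (f := fun j : Nat => -((j : Int) + 1))
    (g := fun (st : List Int × Int) (v : Int) => (st.1 ++ [st.2 + v], st.2 + v))]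
  rw [List.map_reverse, foldPair]
  have hneg : ((List.filter (fun j => decide (L.getD (2 * j + 1) ' ' = '1'))
        (List.range (L.length / 2))).map (fun j : Nat => -((j : Int) + 1))).reverse
      = pvNegPart L := by
    unfold pvNegPart
    rw [List.filter_congr (fun j _ => decide_eq_pvP L (2 * j + 1))]
  rw [hneg]
  simp

lemma fold2_eq (L : List Char) (acc : List Int) (s : Int) :
    (PySem.List.pyRange 0 (L.length : Int) 2).foldl
      (fun (st : List Int × Int) i =>
        if PySem.List.pyGetD L i ' ' = '1' then
          (st.1 ++ [st.2 + PySem.Int.floordiv i 2], st.2 + PySem.Int.floordiv i 2)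
        else st) (acc, s)
      = (acc ++ preSums s (pvPosPart L), s + (pvPosPart L).sum) := by
  rw [pyRange_two]
  have hcnt : (((L.length : Int) + 1) / 2).toNat = (L.length + 1) / 2 := by omega
  rw [hcnt, List.foldl_map]
  have hcg := PySem.List.foldl_congr_mem (List.range ((L.length + 1) / 2))
    (fun (st : List Int × Int) (j : Nat) =>
      if PySem.List.pyGetD L ((0 : Int) + 2 * (j : Int)) ' ' = '1' then
        (st.1 ++ [st.2 + PySem.Int.floordiv ((0 : Int) + 2 * (j : Int)) 2],
          st.2 + PySem.Int.floordiv ((0 : Int) + 2 * (j : Int)) 2)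
      else st)
    (fun (st : List Int × Int) (j : Nat) =>
      if L.getD (2 * j) ' ' = '1' then
        (st.1 ++ [st.2 + (j : Int)], st.2 + (j : Int))
      else st)
    (acc, s)
    (by
      intro st j hj
      dsimp only
      have hidx : (0 : Int) + 2 * (j : Int) = ((2 * j : Nat) : Int) := by omega
      rw [hidx, PySem.List.pyGetD_natCast]
      have hval : PySem.Int.floordiv ((2 * j : Nat) : Int) 2 = (j : Int) := by
        rw [PySem.Int.floordiv_eq_ediv_of_pos (by norm_num)]
        omega
      rw [hval])
  rw [hcg]
  rw [PySem.List.foldl_ite_eq_foldl_filter (p := fun j : Nat => L.getD (2 * j) ' ' = '1')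
    (f := fun (st : List Int × Int) (j : Nat) =>
      (st.1 ++ [st.2 + (j : Int)], st.2 + (j : Int)))]
  rw [← List.foldl_map (f := fun j : Nat => (j : Int))
    (g := fun (st : List Int × Int) (v : Int) => (st.1 ++ [st.2 + v], st.2 + v))]
  rw [foldPair]
  have hpos : (List.filter (fun j => decide (L.getD (2 * j) ' ' = '1'))
        (List.range ((L.length + 1) / 2))).map (fun j : Nat => (j : Int))
      = pvPosPart L := by
    unfold pvPosPart
    rw [List.filter_congr (fun j _ => decide_eq_pvP L (2 * j))]
  rw [hpos]

lemma encode_eq (l : List Int) :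
    l.foldl
      (fun (acc : Int) (value : Int) =>
        if value < 0 then PySem.Int.bor acc ((1 : Int) <<< (-value * 2 - 1).toNat)
        else PySem.Int.bor acc ((1 : Int) <<< (value * 2).toNat)) 0 = encodeF l := by
  unfold encodeF
  congr 1
  funext a u
  by_cases h : u < 0
  · rw [if_pos h]
    unfold encB
    rw [if_neg (by omega)]
  · rw [if_neg h]
    unfold encB
    rw [if_pos (by omega)]

lemma A_core (es : List Char) :
    (((PySem.List.pyRange 0 (es.length : Int) 2).foldl
        (fun (st : List Int × Int) i =>
          if PySem.List.pyGetD es i ' ' = '1' then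
            (st.1 ++ [st.2 + PySem.Int.floordiv i 2], st.2 + PySem.Int.floordiv i 2)
          else st)
        ((PySem.List.pyRange (PySem.Int.floordiv (es.length : Int) 2 * 2 - 1) (-1) (-2)).foldl
          (fun (st : List Int × Int) i =>
            if PySem.List.pyGetD es i ' ' = '1' then
              (st.1 ++ [st.2 + PySem.Int.floordiv (-(i + 1)) 2],
                st.2 + PySem.Int.floordiv (-(i + 1)) 2)
            else st) ([], 0))).1.foldl
      (fun (acc : Int) (value : Int) =>
        if value < 0 then PySem.Int.bor acc ((1 : Int) <<< (-value * 2 - 1).toNat)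
        else PySem.Int.bor acc ((1 : Int) <<< (value * 2).toNat)) 0)
      = encodeF (preSums 0 (pvNegPart es ++ pvPosPart es)) := by
  rw [fold1_eq, fold2_eq, encode_eq, preSums_append, zero_add]

lemma A_on_list (n : Int) :
    code_derived_set n
      = encodeF (preSums 0
          (pvNegPart ((PySem.List.slice (PySem.Int.toBinChars0b n) (some 2) none).reverse)
            ++ pvPosPart ((PySem.List.slice (PySem.Int.toBinChars0b n) (some 2) none).reverse))) := by
  exact A_core _

-- the decoded string A sees
lemma es_of_nonneg (n : Int) (h : 0 ≤ n) :
    (PySem.List.slice (PySem.Int.toBinChars0b n) (some 2) none).reverse = bitsLSB n.toNat := by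
  unfold PySem.Int.toBinChars0b
  rw [if_neg (by omega)]
  rw [PySem.List.slice_from (a := 2) _ (by norm_num)]
  show (Nat.toDigits 2 n.toNat).reverse = _
  rw [toDigits_eq_bits, List.reverse_reverse]

lemma es_of_neg (n : Int) (h : n < 0) :
    (PySem.List.slice (PySem.Int.toBinChars0b n) (some 2) none).reverse
      = bitsLSB n.natAbs ++ ['b'] := by
  unfold PySem.Int.toBinChars0b
  rw [if_pos h]
  rw [PySem.List.slice_from (a := 2) _ (by norm_num)]
  show ('b' :: Nat.toDigits 2 n.natAbs).reverse = _
  rw [List.reverse_cons, toDigits_eq_bits, List.reverse_reverse]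

-- trailing junk character is ignored by both parts
lemma negPart_append_junk (L : List Char) (c : Char) (h : c ≠ '1') :
    pvNegPart (L ++ [c]) = pvNegPart L := by
  unfold pvNegPart
  have hget : ∀ j ∈ List.range (L.length / 2), pvP (L ++ [c]) (2 * j + 1) = pvP L (2 * j + 1) := by
    intro j hj
    rw [List.mem_range] at hj
    unfold pvP
    rw [List.getD_append L [c] ' ' _ (by omega)]
  simp only [List.length_append, List.length_cons, List.length_nil]
  rcases Nat.mod_two_eq_zero_or_one L.length with hp | hp
  · have h1 : (L.length + 1) / 2 = L.length / 2 := by omega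
    rw [h1, List.filter_congr hget]
  · have h1 : (L.length + 1) / 2 = L.length / 2 + 1 := by omega
    rw [h1, List.range_succ, List.filter_append, List.filter_congr hget]
    have hlast : pvP (L ++ [c]) (2 * (L.length / 2) + 1) = false := by
      unfold pvP
      rw [(by omega : 2 * (L.length / 2) + 1 = L.length),
        List.getD_append_right L [c] ' ' L.length (le_refl _), Nat.sub_self]
      simpa using h
    simp [hlast]

lemma posPart_append_junk (L : List Char) (c : Char) (h : c ≠ '1') :
    pvPosPart (L ++ [c]) = pvPosPart L := by
  unfold pvPosPart
  have hget : ∀ j ∈ List.range ((L.length + 1) / 2), pvP (L ++ [c]) (2 * j) = pvP L (2 * j) := by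
    intro j hj
    rw [List.mem_range] at hj
    unfold pvP
    rw [List.getD_append L [c] ' ' _ (by omega)]
  simp only [List.length_append, List.length_cons, List.length_nil]
  rcases Nat.mod_two_eq_zero_or_one L.length with hp | hp
  · have h1 : (L.length + 1 + 1) / 2 = (L.length + 1) / 2 + 1 := by omega
    rw [h1, List.range_succ, List.filter_append, List.filter_congr hget]
    have hlast : pvP (L ++ [c]) (2 * ((L.length + 1) / 2)) = false := by
      unfold pvP
      rw [(by omega : 2 * ((L.length + 1) / 2) = L.length),
        List.getD_append_right L [c] ' ' L.length (le_refl _), Nat.sub_self]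
      simpa using h
    simp [hlast]
  · have h1 : (L.length + 1 + 1) / 2 = (L.length + 1) / 2 := by omega
    rw [h1, List.filter_congr hget]

-- B's side
lemma cds_eq_valsFrom (m : Nat) : ∀ i, cdsCollect m i = valsFrom (bitsCore m) i := by
  induction m using Nat.strong_induction_on with
  | _ m ih =>
    intro i
    rw [cdsCollect, bitsCore]
    by_cases h : m = 0
    · simp [h, valsFrom]
    · rw [dif_neg h, dif_neg h]
      simp only [valsFrom]
      rw [ih (m / 2) (Nat.div_lt_self (Nat.pos_of_ne_zero h) one_lt_two)]
      congr 1
      rcases Nat.mod_two_eq_zero_or_one m with hp | hp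
      · rw [hp]
        norm_num
        decide
      · rw [hp]
        simp [pvVal]

lemma valsFrom_eq (L : List Char) : ∀ i,
    valsFrom L i = ((List.range L.length).filter (pvP L)).map (fun k => pvVal (i + k)) := by
  induction L with
  | nil => intro i; simp [valsFrom]
  | cons c t ih =>
    intro i
    simp only [valsFrom, List.length_cons, List.range_succ_eq_map, List.filter_cons,
      List.filter_map]
    have hp0 : pvP (c :: t) 0 = (c == '1') := by simp [pvP]
    have hps : (pvP (c :: t) ∘ Nat.succ) = pvP t := by
      funext k; simp [pvP, Function.comp]
    rw [hp0, hps, ih (i + 1)]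
    have hm : ((fun k => pvVal (i + k)) ∘ Nat.succ) = fun k => pvVal (i + 1 + k) := by
      funext k
      simp only [Function.comp, Nat.succ_eq_add_one]
      ring_nf
    by_cases hc : c = '1'
    · rw [if_pos hc, if_pos (by simp [hc])]
      simp only [List.map_cons, List.map_map, hm]
      simp
    · rw [if_neg hc, if_neg (by simp [hc])]
      simp only [List.map_map, hm]
      simp

lemma idxPerm (len : Nat) :
    (List.range len).Perm
      ((List.range (len / 2)).map (fun j => 2 * j + 1)
        ++ (List.range ((len + 1) / 2)).map (fun j => 2 * j)) := by
  rw [List.perm_ext_iff_of_nodup List.nodup_range]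
  · intro a
    simp only [List.mem_range, List.mem_append, List.mem_map]
    constructor
    · intro ha
      rcases Nat.mod_two_eq_zero_or_one a with hp | hp
      · right; exact ⟨a / 2, by omega, by omega⟩
      · left; exact ⟨a / 2, by omega, by omega⟩
    · rintro (⟨j, hj, rfl⟩ | ⟨j, hj, rfl⟩) <;> omega
  · rw [List.nodup_append]
    refine ⟨List.Nodup.map (fun a b h => by omega) List.nodup_range,
      List.Nodup.map (fun a b h => by omega) List.nodup_range, ?_⟩
    intro a ha b hb
    simp only [List.mem_map, List.mem_range] at ha hb
    obtain ⟨j, _, rfl⟩ := ha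
    obtain ⟨j', _, rfl⟩ := hb
    omega

lemma oddComp (L : List Char) :
    (((List.range (L.length / 2)).map (fun j => 2 * j + 1)).filter (pvP L)).map pvVal
      = ((List.range (L.length / 2)).filter (fun j => pvP L (2 * j + 1))).map
          (fun j : Nat => -((j : Int) + 1)) := by
  rw [List.filter_map, List.map_map]
  have hp : (pvP L ∘ fun j => 2 * j + 1) = fun j => pvP L (2 * j + 1) := rfl
  rw [hp]
  apply List.map_congr_left
  intro j _
  show pvVal (2 * j + 1) = -((j : Int) + 1)
  unfold pvVal
  rw [if_neg (by omega), (by omega : (2 * j + 1 + 1) / 2 = j + 1)]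
  push_cast
  ring

lemma evenComp (L : List Char) :
    (((List.range ((L.length + 1) / 2)).map (fun j => 2 * j)).filter (pvP L)).map pvVal
      = ((List.range ((L.length + 1) / 2)).filter (fun j => pvP L (2 * j))).map
          (fun j : Nat => (j : Int)) := by
  rw [List.filter_map, List.map_map]
  have hp : (pvP L ∘ fun j => 2 * j) = fun j => pvP L (2 * j) := rfl
  rw [hp]
  apply List.map_congr_left
  intro j _
  show pvVal (2 * j) = (j : Int)
  unfold pvVal
  rw [if_pos (by omega), (by omega : 2 * j / 2 = j)]

lemma valsPerm (L : List Char) : (pvNegPart L ++ pvPosPart L).Perm (valsFrom L 0) := by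
  have hv : valsFrom L 0 = ((List.range L.length).filter (pvP L)).map pvVal := by
    rw [valsFrom_eq L 0]
    apply List.map_congr_left
    intro k _
    rw [Nat.zero_add]
  rw [hv]
  have hbig := (((idxPerm L.length).filter (pvP L)).map pvVal).symm
  rw [List.filter_append, List.map_append, oddComp, evenComp] at hbig
  refine List.Perm.trans ?_ hbig
  apply List.Perm.append_right
  unfold pvNegPart
  exact List.reverse_perm _

lemma parts_pairwise (L : List Char) : (pvNegPart L ++ pvPosPart L).Pairwise (· < ·) := by
  rw [List.pairwise_append]
  refine ⟨?_, ?_, ?_⟩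
  · unfold pvNegPart
    rw [List.pairwise_reverse, List.pairwise_map]
    apply List.Pairwise.filter
    apply List.Pairwise.imp ?_ (List.pairwise_lt_range (n := L.length / 2))
    intro a b hab
    omega
  · unfold pvPosPart
    rw [List.pairwise_map]
    apply List.Pairwise.filter
    apply List.Pairwise.imp ?_ (List.pairwise_lt_range (n := (L.length + 1) / 2))
    intro a b hab
    omega
  · intro a ha b hb
    unfold pvNegPart at ha
    unfold pvPosPart at hb
    rw [List.mem_reverse, List.mem_map] at ha
    rw [List.mem_map] at hb
    obtain ⟨j, _, rfl⟩ := ha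
    obtain ⟨j', _, rfl⟩ := hb
    omega

lemma sorted_vals (L : List Char) :
    PySem.List.sorted (valsFrom L 0) (fun x => x) false = pvNegPart L ++ pvPosPart L := by
  exact PySem.List.sorted_eq_of_perm_of_pairwise_lt _ _ _ (valsPerm L) (parts_pairwise L)

lemma foldB (l : List Int) : ∀ (o s : Int),
    l.foldl
      (fun (st : Int × Int) v =>
        let s := st.2 + v
        (PySem.Int.bor st.1 (if s ≥ 0 then (1 : Int) <<< (s * 2).toNat
          else (1 : Int) <<< (-s * 2 - 1).toNat), s)) (o, s)
      = ((preSums s l).foldl (fun a u => PySem.Int.bor a (encB u)) o, s + l.sum) := by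
  induction l with
  | nil => intro o s; simp [preSums]
  | cons v t ih =>
    intro o s
    simp only [List.foldl_cons, preSums, List.sum_cons]
    rw [ih]
    unfold encB
    simp [add_assoc]

lemma valsFrom_bitsLSB (m : Nat) : valsFrom (bitsLSB m) 0 = valsFrom (bitsCore m) 0 := by
  unfold bitsLSB
  by_cases h : m = 0
  · subst h
    rw [if_pos rfl, bitsCore]
    simp [valsFrom]
  · rw [if_neg h]

lemma B_core (vs : List Int) :
    (vs.foldl
      (fun (st : Int × Int) v =>
        let s := st.2 + v
        (PySem.Int.bor st.1 (if s ≥ 0 then (1 : Int) <<< (s * 2).toNat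
          else (1 : Int) <<< (-s * 2 - 1).toNat), s))
      (0, 0)).1 = encodeF (preSums 0 vs) := by
  rw [foldB]
  rfl

lemma B_on_list (n : Int) :
    code_derived_set_alt n
      = encodeF (preSums 0 (pvNegPart (bitsLSB n.natAbs) ++ pvPosPart (bitsLSB n.natAbs))) := by
  have h2 : code_derived_set_alt n
      = encodeF (preSums 0 (PySem.List.sorted (cdsCollect n.natAbs 0) (fun x => x) false)) :=
    B_core _
  rw [h2, cds_eq_valsFrom, ← valsFrom_bitsLSB, sorted_vals]

-- ===== VERDICT (by name: the statement is the Claim_ definition above) =====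
theorem code_derived_set_spec : Claim_equal_code_derived_set := by
  intro n _
  show code_derived_set n = code_derived_set_alt n
  rw [A_on_list, B_on_list]
  by_cases h : 0 ≤ n
  · have hn : n.toNat = n.natAbs := by omega
    rw [es_of_nonneg n h, hn]
  · have h' : n < 0 := by omega
    rw [es_of_neg n h', negPart_append_junk _ _ (by decide), posPart_append_junk _ _ (by decide)]
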